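-- pv_equiv track=rewrite | github.com/qq371260/ViralScout | VSFV/vector.py | swap_strand_counts
-- ===== SOURCE A (Python) =====
-- def swap_strand_counts(row, mode, length_range, nucleotides):
--     """Create a minus strand version by swapping plus and minus strand counts"""
--
--     if mode == 'sizeXstr':
--         # For sizeXstr: swap plus and minus for each length
--         swapped_row = [row[0] + '_minus']  # Reference name with _minus suffix
--         for i in range(1, len(row), 2):  # Process in pairs: plus, minus
--             if i + 1 < len(row):
--                 swapped_row.append(row[i + 1])  # minus becomes first
--                 swapped_row.append(row[i])  # plus becomes second
--         return swapped_row
--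
--     elif mode == 'sizeX5ntXstr':
--         # For sizeX5ntXstr: swap plus and minus for each length and nucleotide
--         swapped_row = [row[0] + '_minus']  # Reference name with _minus suffix
--         # Each length has 8 columns: A_plus, A_minus, T_plus, T_minus, C_plus, C_minus, G_plus, G_minus
--         for i in range(1, len(row), 8):
--             for nt_idx in range(4):  # For each nucleotide (A, T, C, G)
--                 plus_idx = i + (nt_idx * 2)
--                 minus_idx = plus_idx + 1
--                 if minus_idx < len(row):
--                     swapped_row.append(row[minus_idx])  # minus becomes first
--                     swapped_row.append(row[plus_idx])  # plus becomes second
--         return swapped_row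
--
--     else:
--         return None
-- ===== SOURCE B (Python) =====
-- def swap_strand_counts(row, mode, length_range, nucleotides):
--     """Create a minus strand version by swapping plus and minus strand counts"""
--     # Both of A's modes produce the same output: swap each adjacent pair after
--     # the reference name, dropping a trailing unpaired element.
--     if mode not in ('sizeXstr', 'sizeX5ntXstr'):
--         return None
--     out = [row[0] + '_minus']
--     rest = row[1:]
--     while len(rest) >= 2:
--         out.append(rest[1])
--         out.append(rest[0])
--         rest = rest[2:]
--     return out
-- ===== Notes on version B (the rewrite author's own statement) =====
-- stated objective: simpler
-- what changed: A's two separate index-arithmetic branches (one with a nested group-of-8 double loop over computed plus/minus indices) are replaced by a single guard and one structural pair-consuming loop over the tail of the row, which both modes provably reduce to.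
import Mathlib
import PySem

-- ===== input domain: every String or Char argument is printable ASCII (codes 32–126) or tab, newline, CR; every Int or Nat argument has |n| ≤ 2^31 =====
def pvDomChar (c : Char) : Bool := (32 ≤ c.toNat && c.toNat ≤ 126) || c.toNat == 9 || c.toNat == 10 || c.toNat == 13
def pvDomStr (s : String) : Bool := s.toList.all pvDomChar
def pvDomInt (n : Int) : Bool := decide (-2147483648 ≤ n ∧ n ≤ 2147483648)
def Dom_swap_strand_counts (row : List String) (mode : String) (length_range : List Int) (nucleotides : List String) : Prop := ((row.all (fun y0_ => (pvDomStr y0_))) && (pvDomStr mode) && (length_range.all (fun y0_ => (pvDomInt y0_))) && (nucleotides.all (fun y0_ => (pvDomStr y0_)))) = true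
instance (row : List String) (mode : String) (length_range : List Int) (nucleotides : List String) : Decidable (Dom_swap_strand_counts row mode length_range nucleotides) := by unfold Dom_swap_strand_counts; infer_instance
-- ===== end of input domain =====

-- B replaces A's two index-arithmetic branches (one a nested group-of-8 double loop)
-- by one guard and a single structural pair-consuming loop: objective 'simpler'.

-- ===== PORT A =====
-- Literal port of A: two branches, index loops with range(); row[k] = pyGetD (in
-- range whenever read, Pre_ excludes the row[0] IndexError on an empty row).
def swap_strand_counts (row : List String) (mode : String) (length_range : List Int) (nucleotides : List String) : Option (List String) :=
  if mode = "sizeXstr" then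
    some ((PySem.List.pyRange 1 (row.length : Int) 2).foldl
      (fun acc i => if i + 1 < (row.length : Int) then
          acc ++ [PySem.List.pyGetD row (i + 1) "", PySem.List.pyGetD row i ""]
        else acc)
      [PySem.List.pyGetD row 0 "" ++ "_minus"])
  else if mode = "sizeX5ntXstr" then
    some ((PySem.List.pyRange 1 (row.length : Int) 8).foldl
      (fun acc i => (PySem.List.pyRange 0 4 1).foldl
        (fun acc2 nt =>
          let plus_idx := i + nt * 2
          let minus_idx := plus_idx + 1
          if minus_idx < (row.length : Int) then
            acc2 ++ [PySem.List.pyGetD row minus_idx "", PySem.List.pyGetD row plus_idx ""]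
          else acc2)
        acc)
      [PySem.List.pyGetD row 0 "" ++ "_minus"])
  else none

-- ===== PORT B =====
-- the while loop of Source B: consume rest two at a time, appending the swapped pair
def pvSwapLoop (out : List String) (rest : List String) : List String :=
  if h : 2 ≤ rest.length then
    pvSwapLoop (out ++ [PySem.List.pyGetD rest 1 "", PySem.List.pyGetD rest 0 ""])
      (PySem.List.slice rest (some 2))
  else out
termination_by rest.length
decreasing_by
  rw [PySem.List.slice_from rest (by norm_num : (0:Int) ≤ 2)]
  simp; omega

def swap_strand_counts_alt (row : List String) (mode : String) (length_range : List Int) (nucleotides : List String) : Option (List String) :=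
  if mode = "sizeXstr" ∨ mode = "sizeX5ntXstr" then
    some (pvSwapLoop [PySem.List.pyGetD row 0 "" ++ "_minus"] (PySem.List.slice row (some 1)))
  else none

-- ===== PRECONDITION & SPEC =====
-- Pre_ excludes only the inputs where Python A raises IndexError: an empty row in
-- one of the two recognised modes (row[0] is read there; B raises identically).
def Pre_swap_strand_counts (row : List String) (mode : String) (length_range : List Int) (nucleotides : List String) : Prop :=
  (mode = "sizeXstr" ∨ mode = "sizeX5ntXstr") → row ≠ []
instance (row : List String) (mode : String) (length_range : List Int) (nucleotides : List String) : Decidable (Pre_swap_strand_counts row mode length_range nucleotides) := by unfold Pre_swap_strand_counts; infer_instance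

def pvWitness_swap_strand_counts : List String × String × List Int × List String :=
  (["ref", "p1", "m1", "p2", "m2"], "sizeXstr", [], [])

def Spec_swap_strand_counts (row : List String) (mode : String) (length_range : List Int) (nucleotides : List String) (out : Option (List String)) : Prop := out = swap_strand_counts_alt row mode length_range nucleotides
instance (row : List String) (mode : String) (length_range : List Int) (nucleotides : List String) (out : Option (List String)) : Decidable (Spec_swap_strand_counts row mode length_range nucleotides out) := by unfold Spec_swap_strand_counts; infer_instance

-- ===== CLAIM (what is proved, stated in full; the proofs are below) =====
def Claim_equal_swap_strand_counts : Prop := ∀ (row : List String) (mode : String) (length_range : List Int) (nucleotides : List String), Dom_swap_strand_counts row mode length_range nucleotides → Pre_swap_strand_counts row mode length_range nucleotides → Spec_swap_strand_counts row mode length_range nucleotides (swap_strand_counts row mode length_range nucleotides)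

-- ===== LEMMAS AND PROOFS =====

-- range(a, b, s) with 0 < s: one step of the loop
theorem pvRange_cons (a b s : Int) (hs : 0 < s) (h : a < b) :
    PySem.List.pyRange a b s = a :: PySem.List.pyRange (a + s) b s := by
  rw [PySem.List.pyRange_of_pos _ _ hs, PySem.List.pyRange_of_pos _ _ hs, if_pos h]
  have hsum : (b - a + s - 1) / s = (b - a - 1) / s + 1 := by
    have h' : b - a + s - 1 = (b - a - 1) + 1 * s := by ring
    rw [h', Int.add_mul_ediv_right _ _ (ne_of_gt hs)]
  have hq0 : 0 ≤ (b - a - 1) / s := Int.ediv_nonneg (by omega) (by omega)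
  by_cases h2 : a + s < b
  · rw [if_pos h2]
    have h3 : b - (a + s) + s - 1 = b - a - 1 := by ring
    rw [h3]
    have h4 : ((b - a + s - 1) / s).toNat = ((b - a - 1) / s).toNat + 1 := by omega
    rw [h4, List.range_succ_eq_map, List.map_cons, List.map_map]
    refine congrArg₂ List.cons (by simp) ?_
    apply List.map_congr_left
    intro k _
    simp only [Function.comp_apply]
    push_cast
    ring
  · rw [if_neg h2]
    have hq : (b - a - 1) / s = 0 := Int.ediv_eq_zero_of_lt (by omega) (by omega)
    have h4 : ((b - a + s - 1) / s).toNat = 1 := by omega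
    rw [h4]
    simp

theorem pvRange_nil (a b s : Int) (hs : 0 < s) (h : b ≤ a) :
    PySem.List.pyRange a b s = [] := by
  rw [PySem.List.pyRange_of_pos _ _ hs, if_neg (by omega)]
  simp

theorem pvSwapLoop_stop (out rest : List String) (h : rest.length < 2) :
    pvSwapLoop out rest = out := by
  unfold pvSwapLoop
  rw [dif_neg (by omega)]

theorem pvSwapLoop_cons (out : List String) (a b : String) (t : List String) :
    pvSwapLoop out (a :: b :: t) = pvSwapLoop (out ++ [b, a]) t := by
  rw [pvSwapLoop]
  rw [dif_pos (by simp)]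
  congr 1
  · simp [PySem.List.pyGetD]
  · rw [PySem.List.slice_from _ (by norm_num : (0:Int) ≤ 2)]
    rfl

theorem pvStep (row : List String) (j : Nat) (h : j + 1 < row.length) (out : List String) :
    pvSwapLoop out (row.drop j) =
      pvSwapLoop (out ++ [row[j + 1], row[j]]) (row.drop (j + 2)) := by
  rw [List.drop_eq_getElem_cons (by omega : j < row.length),
      List.drop_eq_getElem_cons (by omega : j + 1 < row.length)]
  exact pvSwapLoop_cons out _ _ _

theorem pvStop (row : List String) (j : Nat) (h : row.length ≤ j + 1) (out : List String) :
    pvSwapLoop out (row.drop j) = out := by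
  apply pvSwapLoop_stop
  simp; omega

theorem pvGet (row : List String) (j : Nat) (h : j < row.length) :
    PySem.List.pyGetD row (j : Int) "" = row[j] := by
  rw [PySem.List.pyGetD_eq_getElem _ _ (by omega) (by exact_mod_cast h)]
  simp

-- mode 'sizeXstr': A's index loop with step 2 equals B's pair-consuming loop
theorem pvModeA1 (row : List String) : ∀ (fuel i : Nat) (out : List String),
    row.length - i ≤ fuel →
    (PySem.List.pyRange (i : Int) (row.length : Int) 2).foldl
      (fun acc k => if k + 1 < (row.length : Int) then
          acc ++ [PySem.List.pyGetD row (k + 1) "", PySem.List.pyGetD row k ""]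
        else acc) out
      = pvSwapLoop out (row.drop i) := by
  intro fuel
  induction fuel with
  | zero =>
    intro i out hfuel
    rw [pvRange_nil _ _ _ (by norm_num) (by exact_mod_cast (by omega : row.length ≤ i))]
    rw [pvStop row i (by omega) out]
    rfl
  | succ fuel ih =>
    intro i out hfuel
    by_cases hi : i < row.length
    · rw [pvRange_cons _ _ _ (by norm_num) (by exact_mod_cast hi), List.foldl_cons]
      by_cases h1 : i + 1 < row.length
      · rw [if_pos (by exact_mod_cast h1 : (i : Int) + 1 < (row.length : Int))]
        have e1 : (i : Int) + 1 = ((i + 1 : Nat) : Int) := by push_cast; ring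
        have e2 : (i : Int) + 2 = ((i + 2 : Nat) : Int) := by push_cast; ring
        rw [e1, e2, pvGet row (i + 1) h1, pvGet row i hi]
        rw [ih (i + 2) _ (by omega)]
        rw [pvStep row i h1 out]
      · rw [if_neg (by exact_mod_cast h1 : ¬ ((i : Int) + 1 < (row.length : Int)))]
        rw [pvRange_nil _ _ _ (by norm_num) (by push_cast; omega)]
        rw [pvStop row i (by omega) out]
        rfl
    · rw [pvRange_nil _ _ _ (by norm_num) (by exact_mod_cast (by omega : row.length ≤ i))]
      rw [pvStop row i (by omega) out]
      rfl

-- the inner nucleotide loop of A is the step-2 pair loop on four explicit indices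
theorem pvInnerEq (row : List String) (j : Int) (out : List String) :
    (PySem.List.pyRange 0 4 1).foldl
      (fun acc2 nt =>
        let plus_idx := j + nt * 2
        let minus_idx := plus_idx + 1
        if minus_idx < (row.length : Int) then
          acc2 ++ [PySem.List.pyGetD row minus_idx "", PySem.List.pyGetD row plus_idx ""]
        else acc2) out
    = [j, j + 2, j + 4, j + 6].foldl
      (fun acc k => if k + 1 < (row.length : Int) then
          acc ++ [PySem.List.pyGetD row (k + 1) "", PySem.List.pyGetD row k ""]
        else acc) out := by
  have hr4 : PySem.List.pyRange 0 4 1 = [0, 1, 2, 3] := by decide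
  rw [hr4]
  simp only [List.foldl_cons, List.foldl_nil]
  norm_num

theorem pvF_pos (row : List String) (j : Nat) (h : j + 1 < row.length) (acc : List String) :
    (if (j : Int) + 1 < (row.length : Int) then
        acc ++ [PySem.List.pyGetD row ((j : Int) + 1) "", PySem.List.pyGetD row (j : Int) ""]
      else acc)
    = acc ++ [row[j + 1], row[j]] := by
  rw [if_pos (by exact_mod_cast h)]
  have e1 : (j : Int) + 1 = ((j + 1 : Nat) : Int) := by push_cast; ring
  rw [e1, pvGet row (j + 1) h, pvGet row j (by omega)]

theorem pvF_neg (row : List String) (j : Nat) (h : ¬ (j + 1 < row.length)) (acc : List String) :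
    (if (j : Int) + 1 < (row.length : Int) then
        acc ++ [PySem.List.pyGetD row ((j : Int) + 1) "", PySem.List.pyGetD row (j : Int) ""]
      else acc)
    = acc := if_neg (by exact_mod_cast h)

-- mode 'sizeX5ntXstr': A's group-of-8 double loop equals B's pair-consuming loop
theorem pvModeA2 (row : List String) : ∀ (fuel i : Nat) (out : List String),
    row.length - i ≤ fuel →
    (PySem.List.pyRange (i : Int) (row.length : Int) 8).foldl
      (fun acc k => (PySem.List.pyRange 0 4 1).foldl
        (fun acc2 nt =>
          let plus_idx := k + nt * 2
          let minus_idx := plus_idx + 1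
          if minus_idx < (row.length : Int) then
            acc2 ++ [PySem.List.pyGetD row minus_idx "", PySem.List.pyGetD row plus_idx ""]
          else acc2)
        acc) out
      = pvSwapLoop out (row.drop i) := by
  intro fuel
  induction fuel with
  | zero =>
    intro i out hfuel
    rw [pvRange_nil (i : Int) (row.length : Int) 8 (by norm_num) (by exact_mod_cast (by omega : row.length ≤ i))]
    rw [pvStop row i (by omega) out]
    rfl
  | succ fuel ih =>
    intro i out hfuel
    by_cases hi : i < row.length
    · have e2 : (i : Int) + 2 = ((i + 2 : Nat) : Int) := by push_cast; ring
      have e4 : (i : Int) + 4 = ((i + 4 : Nat) : Int) := by push_cast; ring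
      have e6 : (i : Int) + 6 = ((i + 6 : Nat) : Int) := by push_cast; ring
      have e8 : (i : Int) + 8 = ((i + 8 : Nat) : Int) := by push_cast; ring
      rw [pvRange_cons (i : Int) (row.length : Int) 8 (by norm_num) (by exact_mod_cast hi),
          List.foldl_cons, pvInnerEq row (i : Int) out, e2, e4, e6, e8]
      simp only [List.foldl_cons, List.foldl_nil]
      by_cases h1 : i + 1 < row.length
      · rw [pvF_pos row i h1 out]
        by_cases h3 : i + 3 < row.length
        · rw [pvF_pos row (i + 2) (by omega)]
          by_cases h5 : i + 5 < row.length
          · rw [pvF_pos row (i + 4) (by omega)]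
            by_cases h7 : i + 7 < row.length
            · rw [pvF_pos row (i + 6) (by omega)]
              rw [ih (i + 8) _ (by omega)]
              rw [pvStep row i h1 out, pvStep row (i + 2) (by omega),
                  pvStep row (i + 2 + 2) (by omega), pvStep row (i + 2 + 2 + 2) (by omega)]
            · rw [pvF_neg row (i + 6) (by omega)]
              rw [pvRange_nil ((i + 8 : Nat) : Int) (row.length : Int) 8 (by norm_num) (by exact_mod_cast (by omega : row.length ≤ i + 8))]
              simp only [List.foldl_nil]
              rw [pvStep row i h1 out, pvStep row (i + 2) (by omega),
                  pvStep row (i + 2 + 2) (by omega), pvStop row (i + 2 + 2 + 2) (by omega)]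
          · rw [pvF_neg row (i + 4) (by omega), pvF_neg row (i + 6) (by omega)]
            rw [pvRange_nil ((i + 8 : Nat) : Int) (row.length : Int) 8 (by norm_num) (by exact_mod_cast (by omega : row.length ≤ i + 8))]
            simp only [List.foldl_nil]
            rw [pvStep row i h1 out, pvStep row (i + 2) (by omega),
                pvStop row (i + 2 + 2) (by omega)]
        · rw [pvF_neg row (i + 2) (by omega), pvF_neg row (i + 4) (by omega), pvF_neg row (i + 6) (by omega)]
          rw [pvRange_nil ((i + 8 : Nat) : Int) (row.length : Int) 8 (by norm_num) (by exact_mod_cast (by omega : row.length ≤ i + 8))]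
          simp only [List.foldl_nil]
          rw [pvStep row i h1 out, pvStop row (i + 2) (by omega)]
      · rw [pvF_neg row i (by omega) out, pvF_neg row (i + 2) (by omega), pvF_neg row (i + 4) (by omega),
            pvF_neg row (i + 6) (by omega)]
        rw [pvRange_nil ((i + 8 : Nat) : Int) (row.length : Int) 8 (by norm_num) (by exact_mod_cast (by omega : row.length ≤ i + 8))]
        simp only [List.foldl_nil]
        rw [pvStop row i (by omega) out]
    · rw [pvRange_nil (i : Int) (row.length : Int) 8 (by norm_num) (by exact_mod_cast (by omega : row.length ≤ i))]
      rw [pvStop row i (by omega) out]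
      rfl

-- ===== VERDICT (by name: the statement is the Claim_ definition above) =====
theorem swap_strand_counts_spec : Claim_equal_swap_strand_counts := by
  intro row mode length_range nucleotides _ _
  unfold Spec_swap_strand_counts swap_strand_counts swap_strand_counts_alt
  by_cases h1 : mode = "sizeXstr"
  · rw [if_pos h1, if_pos (Or.inl h1)]
    rw [PySem.List.slice_from _ (by norm_num : (0:Int) ≤ 1)]
    have := pvModeA1 row row.length 1 [PySem.List.pyGetD row 0 "" ++ "_minus"] (by omega)
    simpa using this
  · by_cases h2 : mode = "sizeX5ntXstr"
    · rw [if_neg h1, if_pos h2, if_pos (Or.inr h2)]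
      rw [PySem.List.slice_from _ (by norm_num : (0:Int) ≤ 1)]
      have := pvModeA2 row row.length 1 [PySem.List.pyGetD row 0 "" ++ "_minus"] (by omega)
      simpa using this
    · rw [if_neg h1, if_neg h2, if_neg (by tauto)]
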